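-- pv_equiv track=rewrite | github.com/killin0415/potato-wordle | wordle.py | print_colour
-- ===== SOURCE A (Python) =====
-- from typing import List, Tuple
--
-- def turn_green(a: str) -> str:
--     return f'\033[1;32;1m{a}\033[0m'
--
-- def turn_yellow(a: str) -> str:
--     return f'\033[1;33;1m{a}\033[0m'
--
-- def print_colour(word: str, correct: List[int], might_correct: List[int]) -> str:
--
--     output: str = ''
--     for i in range(len(word)):
--         if i in correct:
--             output += turn_green(word[i])
--         elif i in might_correct:
--             output += turn_yellow(word[i])
--         else:
--             output += word[i]
--     return output
-- ===== SOURCE B (Python) =====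
-- def turn_green(a: str) -> str:
--     return f'\033[1;32;1m{a}\033[0m'
--
-- def turn_yellow(a: str) -> str:
--     return f'\033[1;33;1m{a}\033[0m'
--
-- def print_colour(word, correct, might_correct):
--     chars = list(word)
--     for idx in might_correct:
--         if 0 <= idx < len(word):
--             chars[idx] = turn_yellow(word[idx])
--     for idx in correct:
--         if 0 <= idx < len(word):
--             chars[idx] = turn_green(word[idx])
--     return ''.join(chars)
-- ===== Notes on version B (the rewrite author's own statement) =====
-- stated objective: faster
-- what changed: Instead of scanning every word position and membership-testing it against both index lists, B scatter-writes: it prefills a char list from the word, writes yellow at each in-range index of might_correct, then green at each in-range index of correct (so green wins), and joins.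
import Mathlib
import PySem

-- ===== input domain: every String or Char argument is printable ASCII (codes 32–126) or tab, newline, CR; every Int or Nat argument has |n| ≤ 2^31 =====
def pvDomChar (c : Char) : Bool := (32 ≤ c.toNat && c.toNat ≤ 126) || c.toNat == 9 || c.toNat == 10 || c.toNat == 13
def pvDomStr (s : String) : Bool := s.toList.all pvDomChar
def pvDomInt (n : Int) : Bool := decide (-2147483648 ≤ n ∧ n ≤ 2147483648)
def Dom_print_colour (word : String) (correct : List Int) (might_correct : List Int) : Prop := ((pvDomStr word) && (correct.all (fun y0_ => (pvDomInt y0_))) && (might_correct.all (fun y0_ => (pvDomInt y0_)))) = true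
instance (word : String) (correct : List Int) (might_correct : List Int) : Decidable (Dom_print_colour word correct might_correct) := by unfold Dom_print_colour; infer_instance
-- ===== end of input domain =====

-- B replaces A's scan over every word position with membership tests by scatter-writes
-- at the listed in-range indices (yellow first, then green); equivalence proved on all inputs.

-- ===== PORT A =====
-- turn_green / turn_yellow applied to the single character word[i], at List Char level
def pcGreen (c : Char) : List Char := "\x1b[1;32;1m".toList ++ [c] ++ "\x1b[0m".toList
def pcYellow (c : Char) : List Char := "\x1b[1;33;1m".toList ++ [c] ++ "\x1b[0m".toList

-- literal port of A: for i in range(len(word)), membership tests on the index lists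
def print_colour (word : String) (correct : List Int) (might_correct : List Int) : String :=
  String.ofList ((List.range word.toList.length).foldl (fun (acc : List Char) (i : Nat) =>
    if (i : Int) ∈ correct then acc ++ pcGreen (word.toList.getD i ' ')
    else if (i : Int) ∈ might_correct then acc ++ pcYellow (word.toList.getD i ' ')
    else acc ++ [word.toList.getD i ' ']) [])

-- ===== PORT B =====
-- port of Source B: prefill chars = list(word), scatter-write yellow then green, ''.join
def print_colour_alt (word : String) (correct : List Int) (might_correct : List Int) : String :=
  String.ofList
    (List.flatten
      (correct.foldl
        (fun chars idx => if 0 ≤ idx ∧ idx < (word.toList.length : Int)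
          then chars.set idx.toNat (pcGreen (word.toList.getD idx.toNat ' ')) else chars)
        (might_correct.foldl
          (fun chars idx => if 0 ≤ idx ∧ idx < (word.toList.length : Int)
            then chars.set idx.toNat (pcYellow (word.toList.getD idx.toNat ' ')) else chars)
          (word.toList.map (fun c => [c])))))

-- ===== PRECONDITION & SPEC =====
def Spec_print_colour (word : String) (correct : List Int) (might_correct : List Int) (out : String) : Prop := out = print_colour_alt word correct might_correct
instance (word : String) (correct : List Int) (might_correct : List Int) (out : String) : Decidable (Spec_print_colour word correct might_correct out) := by unfold Spec_print_colour; infer_instance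

-- ===== CLAIM (what is proved, stated in full; the proofs are below) =====
def Claim_equal_print_colour : Prop := ∀ (word : String) (correct : List Int) (might_correct : List Int), Dom_print_colour word correct might_correct → Spec_print_colour word correct might_correct (print_colour word correct might_correct)

-- ===== LEMMAS AND PROOFS =====

-- the colour of position i: the common characterisation of both ports
def pcColour (cs : List Char) (correct might_correct : List Int) (i : Nat) : List Char :=
  if (i : Int) ∈ correct then pcGreen (cs.getD i ' ')
  else if (i : Int) ∈ might_correct then pcYellow (cs.getD i ' ')
  else [cs.getD i ' ']

theorem pc_foldl_append {α β : Type} (g : α → List β) (xs : List α) (init : List β) :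
    xs.foldl (fun acc x => acc ++ g x) init = init ++ xs.flatMap g := by
  induction xs generalizing init with
  | nil => simp
  | cons x xs ih => simp [ih]

theorem pc_A_char (word : String) (correct might_correct : List Int) :
    print_colour word correct might_correct =
      String.ofList (((List.range word.toList.length).map
        (pcColour word.toList correct might_correct)).flatten) := by
  unfold print_colour
  have h : (fun (acc : List Char) (i : Nat) =>
      if (i : Int) ∈ correct then acc ++ pcGreen (word.toList.getD i ' ')
      else if (i : Int) ∈ might_correct then acc ++ pcYellow (word.toList.getD i ' ')
      else acc ++ [word.toList.getD i ' '])
      = fun (acc : List Char) (i : Nat) => acc ++ pcColour word.toList correct might_correct i := by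
    funext acc i
    unfold pcColour
    split_ifs <;> rfl
  rw [h, pc_foldl_append]
  simp [List.flatMap_def]

-- the scatter-write loop, elementwise
theorem pc_foldl_set {α : Type} (f : Nat → α) (n : Nat) (lst : List Int)
    (chars : List α) (hlen : chars.length = n) (i : Nat) (hi : i < n) :
    (lst.foldl (fun ch idx =>
        if 0 ≤ idx ∧ idx < (n : Int) then ch.set idx.toNat (f idx.toNat) else ch) chars)[i]?
      = if (i : Int) ∈ lst then some (f i) else chars[i]? := by
  induction lst generalizing chars with
  | nil => simp
  | cons idx rest ih =>
    simp only [List.foldl_cons]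
    set chars' := (if 0 ≤ idx ∧ idx < (n : Int) then chars.set idx.toNat (f idx.toNat) else chars) with hch
    have hlen' : chars'.length = n := by
      rw [hch]; split_ifs <;> simp [hlen]
    rw [ih chars' hlen']
    by_cases hr : (i : Int) ∈ rest
    · simp [hr, List.mem_cons, or_comm]
    · by_cases heq : idx = (i : Int)
      · have hg : 0 ≤ idx ∧ idx < (n : Int) := by constructor <;> omega
        have : chars'[i]? = some (f i) := by
          rw [hch]
          simp only [hg, if_true]
          have : idx.toNat = i := by omega
          rw [this]
          simp [List.getElem?_set, hlen, hi]
        simp [hr, this, heq.symm, List.mem_cons]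
      · have hsame : chars'[i]? = chars[i]? := by
          rw [hch]
          split_ifs with hg
          · rw [List.getElem?_set]
            have : idx.toNat ≠ i := by omega
            simp [this]
          · rfl
        have hni : ¬ (i : Int) = idx := fun h => heq h.symm
        rw [hsame]
        simp [List.mem_cons, hr, hni]

theorem pc_foldl_set_length {α : Type} (f : Nat → α) (n : Nat) (lst : List Int) (chars : List α) :
    (lst.foldl (fun ch idx =>
        if 0 ≤ idx ∧ idx < (n : Int) then ch.set idx.toNat (f idx.toNat) else ch) chars).length
      = chars.length := by
  induction lst generalizing chars with
  | nil => rfl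
  | cons idx rest ih =>
    simp only [List.foldl_cons]
    rw [ih]
    split_ifs <;> simp

theorem pc_B_char (word : String) (correct might_correct : List Int) :
    print_colour_alt word correct might_correct =
      String.ofList (((List.range word.toList.length).map
        (pcColour word.toList correct might_correct)).flatten) := by
  unfold print_colour_alt
  congr 1
  congr 1
  have hl0 : (word.toList.map (fun c => [c])).length = word.toList.length := by simp
  have hl1 : (might_correct.foldl
      (fun chars idx => if 0 ≤ idx ∧ idx < (word.toList.length : Int)
        then chars.set idx.toNat (pcYellow (word.toList.getD idx.toNat ' ')) else chars)
      (word.toList.map (fun c => [c]))).length = word.toList.length := by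
    rw [pc_foldl_set_length (fun k => pcYellow (word.toList.getD k ' ')) word.toList.length
      might_correct (word.toList.map (fun c => [c]))]
    exact hl0
  apply List.ext_getElem?
  intro i
  by_cases hi : i < word.toList.length
  · have hrhs : ((List.range word.toList.length).map
        (pcColour word.toList correct might_correct))[i]? =
        some (pcColour word.toList correct might_correct i) := by
      have hi' : i < word.length := by simpa using hi
      simp [List.getElem?_map, List.getElem?_range, hi']
    rw [hrhs,
      pc_foldl_set (fun k => pcGreen (word.toList.getD k ' ')) word.toList.length correct _ hl1 i hi]
    by_cases hc : (i : Int) ∈ correct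
    · simp [hc, pcColour]
    · rw [if_neg hc,
        pc_foldl_set (fun k => pcYellow (word.toList.getD k ' ')) word.toList.length might_correct _ hl0 i hi]
      by_cases hm : (i : Int) ∈ might_correct
      · simp [hm, pcColour, hc]
      · rw [if_neg hm]
        simp [pcColour, hc, hm, List.getD, List.getElem?_eq_getElem hi]
  · have hl2 : (correct.foldl
        (fun chars idx => if 0 ≤ idx ∧ idx < (word.toList.length : Int)
          then chars.set idx.toNat (pcGreen (word.toList.getD idx.toNat ' ')) else chars)
        (might_correct.foldl
          (fun chars idx => if 0 ≤ idx ∧ idx < (word.toList.length : Int)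
            then chars.set idx.toNat (pcYellow (word.toList.getD idx.toNat ' ')) else chars)
          (word.toList.map (fun c => [c])))).length = word.toList.length := by
      rw [pc_foldl_set_length (fun k => pcGreen (word.toList.getD k ' ')) word.toList.length
        correct _]
      exact hl1
    rw [List.getElem?_eq_none (by rw [hl2]; omega),
      List.getElem?_eq_none (by simpa using Nat.le_of_not_lt hi)]

-- ===== VERDICT (by name: the statement is the Claim_ definition above) =====
theorem print_colour_spec : Claim_equal_print_colour := by
  intro word correct might_correct _
  unfold Spec_print_colour
  rw [pc_A_char, pc_B_char]
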